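-- pv_equiv track=rewrite | github.com/pedro25mascarenhas/Exercicios-Python | exercicios/EstruturaDeDecisao/ex_python019.py | decompor_numeros_menores_que_mil
-- ===== SOURCE A (Python) =====
-- def decompor_numeros_menores_que_mil(numero):
--     if numero > 999:
--         return 'Número inválido'
--
--     else:
--         centenas_str = dezenas_str = unidades_str = frase = ''
--
--         centenas_int, numero = divmod(numero, 100)
--
--         if centenas_int == 1:
--             centenas_str = '1 centena'
--         elif centenas_int > 1:
--             centenas_str = f'{centenas_int} centenas'
--
--         dezenas_int, numero = divmod(numero, 10)
--
--         if dezenas_int == 1: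
--             dezenas_str = '1 dezena'
--         elif dezenas_int > 1:
--             dezenas_str = f'{dezenas_int} dezenas'
--
--         unidades_int = numero
--
--         if unidades_int == 1:
--             unidades_str = '1 unidade'
--         elif unidades_int > 1:
--             unidades_str = f'{unidades_int} unidades'
--
--         lista_frase = [elemento for elemento in [centenas_str, dezenas_str, unidades_str] if elemento != '']
--
--         if len(lista_frase) == 3:
--             frase = lista_frase[0] + ', ' + lista_frase[1] + ' e ' + lista_frase[2]
--         elif len(lista_frase) == 2:
--             frase = lista_frase[0] + ' e ' + lista_frase[1]
--         else:
--             frase = centenas_str + dezenas_str + unidades_str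
--
--         return frase
-- ===== SOURCE B (Python) =====
-- def decompor_numeros_menores_que_mil(numero):
--     if numero > 999:
--         return 'Número inválido'
--     c, r = divmod(numero, 100)
--     d, u = divmod(r, 10)
--
--     def parte(v, nome):
--         if v < 1:
--             return ''
--         if v == 1:
--             return f'1 {nome}'
--         return f'{v} {nome}s'
--
--     # assemble back-to-front: first join uses ' e ', later joins ', '
--     frase, sep = '', ' e '
--     for p in (parte(u, 'unidade'), parte(d, 'dezena'), parte(c, 'centena')):
--         if p:
--             if not frase:
--                 frase = p
--             else:
--                 frase = p + sep + frase
--                 sep = ', '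
--     return frase
-- ===== Notes on version B (the rewrite author's own statement) =====
-- stated objective: simpler
-- what changed: B computes the three digits with two divmods and replaces A's three copy-pasted branch blocks and length-cased join with a single parts table and one right-to-left accumulator loop that uses ' e ' for the first join and ', ' afterwards.
import Mathlib
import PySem

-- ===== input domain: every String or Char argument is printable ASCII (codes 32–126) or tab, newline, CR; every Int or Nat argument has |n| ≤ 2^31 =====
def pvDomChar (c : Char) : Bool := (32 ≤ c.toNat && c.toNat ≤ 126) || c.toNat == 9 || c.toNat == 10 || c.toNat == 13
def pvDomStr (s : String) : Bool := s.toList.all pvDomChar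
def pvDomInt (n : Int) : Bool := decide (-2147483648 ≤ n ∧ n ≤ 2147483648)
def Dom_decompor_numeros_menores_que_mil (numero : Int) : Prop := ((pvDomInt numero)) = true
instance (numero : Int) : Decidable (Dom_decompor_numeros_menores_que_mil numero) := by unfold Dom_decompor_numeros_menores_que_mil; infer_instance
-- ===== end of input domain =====

-- B assembles the sentence with one right-to-left accumulator loop over a parts table instead of
-- A's three copy-pasted branch blocks and length-based join cases (objective: simpler; same cost).

-- ===== PORT A =====
def decompor_numeros_menores_que_mil (numero : Int) : String :=
  if numero > 999 then "Número inválido"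
  else
    let centenas_int := PySem.Int.floordiv numero 100
    let numero1 := PySem.Int.mod numero 100
    let centenas_str :=
      if centenas_int == 1 then "1 centena"
      else if centenas_int > 1 then PySem.Int.toStr centenas_int ++ " centenas" else ""
    let dezenas_int := PySem.Int.floordiv numero1 10
    let numero2 := PySem.Int.mod numero1 10
    let dezenas_str :=
      if dezenas_int == 1 then "1 dezena"
      else if dezenas_int > 1 then PySem.Int.toStr dezenas_int ++ " dezenas" else ""
    let unidades_int := numero2
    let unidades_str :=
      if unidades_int == 1 then "1 unidade"
      else if unidades_int > 1 then PySem.Int.toStr unidades_int ++ " unidades" else ""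
    let lista_frase := [centenas_str, dezenas_str, unidades_str].filter (fun e => !(e == ""))
    if lista_frase.length == 3 then
      lista_frase[0]! ++ ", " ++ lista_frase[1]! ++ " e " ++ lista_frase[2]!
    else if lista_frase.length == 2 then
      lista_frase[0]! ++ " e " ++ lista_frase[1]!
    else centenas_str ++ dezenas_str ++ unidades_str

-- ===== PORT B =====
def pvParte (v : Int) (nome : String) : String :=
  if v < 1 then ""
  else if v == 1 then "1 " ++ nome
  else PySem.Int.toStr v ++ " " ++ nome ++ "s"

def decompor_numeros_menores_que_mil_alt (numero : Int) : String :=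
  if numero > 999 then "Número inválido"
  else
    let c := PySem.Int.floordiv numero 100
    let r := PySem.Int.mod numero 100
    let d := PySem.Int.floordiv r 10
    let u := PySem.Int.mod r 10
    -- assemble back-to-front: first join uses ' e ', later joins ', '
    ([pvParte u "unidade", pvParte d "dezena", pvParte c "centena"].foldl
      (fun (st : String × String) p =>
        if !(p == "") then
          if st.1 == "" then (p, st.2) else (p ++ st.2 ++ st.1, ", ")
        else st)
      ("", " e ")).1

-- ===== PRECONDITION & SPEC =====
def Spec_decompor_numeros_menores_que_mil (numero : Int) (out : String) : Prop := out = decompor_numeros_menores_que_mil_alt numero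
instance (numero : Int) (out : String) : Decidable (Spec_decompor_numeros_menores_que_mil numero out) := by unfold Spec_decompor_numeros_menores_que_mil; infer_instance

-- ===== CLAIM (what is proved, stated in full; the proofs are below) =====
def Claim_equal_decompor_numeros_menores_que_mil : Prop := ∀ (numero : Int), Dom_decompor_numeros_menores_que_mil numero → Spec_decompor_numeros_menores_que_mil numero (decompor_numeros_menores_que_mil numero)

-- ===== LEMMAS AND PROOFS =====

-- A's branch block for each place equals B's table entry, for every integer value
theorem pv_centena_eq (c : Int) :
    (if c == 1 then "1 centena"
     else if c > 1 then PySem.Int.toStr c ++ " centenas" else "") = pvParte c "centena" := by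
  unfold pvParte
  rcases lt_trichotomy c 1 with h | h | h
  · simp [show ¬ (c = 1) by omega, show ¬ (c > 1) by omega, h]
  · simp [h]
  · simp [show ¬ (c = 1) by omega, show ¬ (c < 1) by omega, h]
    rw [String.append_assoc, String.append_assoc]; rfl

theorem pv_dezena_eq (d : Int) :
    (if d == 1 then "1 dezena"
     else if d > 1 then PySem.Int.toStr d ++ " dezenas" else "") = pvParte d "dezena" := by
  unfold pvParte
  rcases lt_trichotomy d 1 with h | h | h
  · simp [show ¬ (d = 1) by omega, show ¬ (d > 1) by omega, h]
  · simp [h]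
  · simp [show ¬ (d = 1) by omega, show ¬ (d < 1) by omega, h]
    rw [String.append_assoc, String.append_assoc]; rfl

theorem pv_unidade_eq (u : Int) :
    (if u == 1 then "1 unidade"
     else if u > 1 then PySem.Int.toStr u ++ " unidades" else "") = pvParte u "unidade" := by
  unfold pvParte
  rcases lt_trichotomy u 1 with h | h | h
  · simp [show ¬ (u = 1) by omega, show ¬ (u > 1) by omega, h]
  · simp [h]
  · simp [show ¬ (u = 1) by omega, show ¬ (u < 1) by omega, h]
    rw [String.append_assoc, String.append_assoc]; rfl

-- A's length-cased join of the nonempty parts equals B's accumulator loop, for ALL strings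
theorem pv_assemble_eq (cs ds us : String) :
    (let lf := [cs, ds, us].filter (fun e => !(e == ""))
     if lf.length == 3 then lf[0]! ++ ", " ++ lf[1]! ++ " e " ++ lf[2]!
     else if lf.length == 2 then lf[0]! ++ " e " ++ lf[1]!
     else cs ++ ds ++ us)
    = ([us, ds, cs].foldl
        (fun (st : String × String) p =>
          if !(p == "") then
            if st.1 == "" then (p, st.2) else (p ++ st.2 ++ st.1, ", ")
          else st)
        ("", " e ")).1 := by
  rcases eq_or_ne cs "" with rfl | hc <;> rcases eq_or_ne ds "" with rfl | hd <;>
      rcases eq_or_ne us "" with rfl | hu <;>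
    simp [List.filter, List.foldl, Bool.beq_eq_decide_eq, String.append_assoc,
      String.append_eq_empty_iff, *]

-- ===== VERDICT (by name: the statement is the Claim_ definition above) =====
theorem decompor_numeros_menores_que_mil_spec : Claim_equal_decompor_numeros_menores_que_mil := by
  intro numero _
  unfold Spec_decompor_numeros_menores_que_mil decompor_numeros_menores_que_mil decompor_numeros_menores_que_mil_alt
  by_cases h : numero > 999
  · simp [h]
  · simp only [if_neg h]
    rw [pv_centena_eq, pv_dezena_eq, pv_unidade_eq]
    exact pv_assemble_eq _ _ _
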